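-- pv_equiv track=rewrite | github.com/NirEllor/Intro_To_CS | 5/image_editor.py | kernel_multiplication
-- ===== SOURCE A (Python) =====
-- def is_edge(x, y, image):
--     """This function determines if the coordinate is at the image's edges"""
--     if x < 0 or y < 0 or x >= len(image) or y >= len(image[0]):
--         return True
--     return False
--
-- def kernel_multiplication(image, kernel, start_point_row, start_point_column):
--     """This function calculates the pixel's value by its neighbors in the image and in the kernel"""
--     pixel = 0
--     size = len(kernel)
--     for i in range(start_point_row, start_point_row + size):  # The rows of the square
--         for j in range(start_point_column, start_point_column + size):  # The columns of the square
--             if is_edge(i, j, image):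
--                 pixel += (image[start_point_row + len(kernel) // 2][start_point_column + len(kernel) // 2]) * \
--                          kernel[0][0]
--             else:
--                 pixel += (image[i][j] * kernel[0][0])
--     if pixel < 0:
--         pixel = 0
--     elif pixel > 255:
--         pixel = 255
--     return round(pixel)
-- ===== SOURCE B (Python) =====
-- def kernel_multiplication(image, kernel, start_point_row, start_point_column):
--     """Pixel value over the kernel window: sum the clipped in-bounds rectangle once,
--     then account for all out-of-bounds cells at once with the center pixel."""
--     size = len(kernel)
--     if size == 0:
--         return 0
--     k = kernel[0][0]
--     rows = len(image)
--     cols = len(image[0]) if image else 0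
--     rlo, rhi = max(start_point_row, 0), min(start_point_row + size, rows)
--     clo, chi = max(start_point_column, 0), min(start_point_column + size, cols)
--     valid_sum = 0
--     valid_count = 0
--     for i in range(rlo, rhi):
--         for j in range(clo, chi):
--             valid_sum += image[i][j]
--             valid_count += 1
--     pixel = valid_sum * k
--     edge_count = size * size - valid_count
--     if edge_count > 0:
--         center = image[start_point_row + size // 2][start_point_column + size // 2]
--         pixel += edge_count * center * k
--     if pixel < 0:
--         pixel = 0
--     elif pixel > 255:
--         pixel = 255
--     return round(pixel)
-- ===== Notes on version B (the rewrite author's own statement) =====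
-- stated objective: alternative
-- what changed: Instead of testing edge-ness per window cell, B sums the clipped in-bounds sub-rectangle in one pass and accounts for all out-of-bounds cells at once as edge_count * center * kernel[0][0], where edge_count = size^2 - in-bounds count.
import Mathlib
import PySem

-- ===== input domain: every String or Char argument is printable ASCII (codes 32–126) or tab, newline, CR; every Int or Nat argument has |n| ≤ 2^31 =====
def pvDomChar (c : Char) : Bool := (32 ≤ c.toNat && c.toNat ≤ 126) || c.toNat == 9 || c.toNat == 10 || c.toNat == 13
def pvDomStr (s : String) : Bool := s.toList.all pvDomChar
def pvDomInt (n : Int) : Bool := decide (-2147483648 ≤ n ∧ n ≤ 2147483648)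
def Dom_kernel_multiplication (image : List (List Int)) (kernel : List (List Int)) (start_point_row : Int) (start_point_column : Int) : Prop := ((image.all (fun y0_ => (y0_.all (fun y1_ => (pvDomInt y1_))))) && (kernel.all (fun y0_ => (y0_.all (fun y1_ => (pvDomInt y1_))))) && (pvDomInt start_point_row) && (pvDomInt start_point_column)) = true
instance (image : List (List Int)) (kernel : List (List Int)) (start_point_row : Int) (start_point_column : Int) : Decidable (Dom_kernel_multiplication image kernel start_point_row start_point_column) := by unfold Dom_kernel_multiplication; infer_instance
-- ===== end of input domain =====

-- B replaces the per-cell edge test by one pass over the clipped in-bounds rectangle plus a single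
-- arithmetic term edge_count * center * kernel[0][0] for all out-of-bounds cells; equal values, same cost class.

-- ===== PORT A =====
def is_edge (x : Int) (y : Int) (image : List (List Int)) : Bool :=
  decide (x < 0) || decide (y < 0) || decide (PySem.List.len image ≤ x) ||
    decide (PySem.List.len (PySem.List.pyGetD image 0 []) ≤ y)

def kernel_multiplication (image : List (List Int)) (kernel : List (List Int)) (start_point_row : Int) (start_point_column : Int) : Int :=
  let size : Int := PySem.List.len kernel
  let pixel : Int :=
    (PySem.List.pyRange start_point_row (start_point_row + size) 1).foldl (fun pixel i =>
      (PySem.List.pyRange start_point_column (start_point_column + size) 1).foldl (fun pixel j =>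
        if is_edge i j image then
          pixel + (PySem.List.pyGetD (PySem.List.pyGetD image (start_point_row + PySem.Int.floordiv (PySem.List.len kernel) 2) []) (start_point_column + PySem.Int.floordiv (PySem.List.len kernel) 2) 0) * (PySem.List.pyGetD (PySem.List.pyGetD kernel 0 []) 0 0)
        else
          pixel + (PySem.List.pyGetD (PySem.List.pyGetD image i []) j 0) * (PySem.List.pyGetD (PySem.List.pyGetD kernel 0 []) 0 0)) pixel) 0
  let pixel : Int := if pixel < 0 then 0 else if 255 < pixel then 255 else pixel
  pixel

-- ===== PORT B =====
def kernel_multiplication_alt (image : List (List Int)) (kernel : List (List Int)) (start_point_row : Int) (start_point_column : Int) : Int :=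
  let size : Int := PySem.List.len kernel
  if size = 0 then 0 else
  let k : Int := PySem.List.pyGetD (PySem.List.pyGetD kernel 0 []) 0 0
  let rows : Int := PySem.List.len image
  let cols : Int := if image = [] then 0 else PySem.List.len (PySem.List.pyGetD image 0 [])
  let rlo : Int := max start_point_row 0
  let rhi : Int := min (start_point_row + size) rows
  let clo : Int := max start_point_column 0
  let chi : Int := min (start_point_column + size) cols
  let vsc : Int × Int :=
    (PySem.List.pyRange rlo rhi 1).foldl (fun p i =>
      (PySem.List.pyRange clo chi 1).foldl (fun p j =>
        (p.1 + PySem.List.pyGetD (PySem.List.pyGetD image i []) j 0, p.2 + 1)) p) (0, 0)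
  let pixel : Int := vsc.1 * k
  let edge_count : Int := size * size - vsc.2
  let pixel : Int :=
    if 0 < edge_count then
      pixel + edge_count * (PySem.List.pyGetD (PySem.List.pyGetD image (start_point_row + PySem.Int.floordiv size 2) []) (start_point_column + PySem.Int.floordiv size 2) 0) * k
    else pixel
  let pixel : Int := if pixel < 0 then 0 else if 255 < pixel then 255 else pixel
  pixel

-- ===== PRECONDITION & SPEC =====
-- Pre_ excludes exactly the inputs on which the Python A raises: a window cell in bounds of row 0 but
-- past the end of its own (shorter) row (IndexError), kernel[0][0] missing while the loop runs, or an
-- out-of-range center-pixel access image[spr+size//2][spc+size//2] when some window cell is out of bounds.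
def Pre_kernel_multiplication (image : List (List Int)) (kernel : List (List Int)) (start_point_row : Int) (start_point_column : Int) : Prop :=
  kernel.length = 0 ∨
  (PySem.List.pyGetD kernel 0 [] ≠ [] ∧
   (∀ i ∈ PySem.List.pyRange (max start_point_row 0) (min (start_point_row + (kernel.length : Int)) (PySem.List.len image)) 1,
      max start_point_column 0 < min (start_point_column + (kernel.length : Int)) (PySem.List.len (PySem.List.pyGetD image 0 [])) →
      min (start_point_column + (kernel.length : Int)) (PySem.List.len (PySem.List.pyGetD image 0 [])) ≤ PySem.List.len (PySem.List.pyGetD image i [])) ∧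
   ((start_point_row < 0 ∨ start_point_column < 0 ∨ PySem.List.len image < start_point_row + (kernel.length : Int) ∨ PySem.List.len (PySem.List.pyGetD image 0 []) < start_point_column + (kernel.length : Int)) →
      (PySem.Raise.InRange image.length (start_point_row + PySem.Int.floordiv (kernel.length : Int) 2) ∧
       PySem.Raise.InRange (PySem.List.pyGetD image (start_point_row + PySem.Int.floordiv (kernel.length : Int) 2) []).length (start_point_column + PySem.Int.floordiv (kernel.length : Int) 2))))
instance (image : List (List Int)) (kernel : List (List Int)) (start_point_row : Int) (start_point_column : Int) : Decidable (Pre_kernel_multiplication image kernel start_point_row start_point_column) := by unfold Pre_kernel_multiplication; infer_instance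

def pvWitness_kernel_multiplication : List (List Int) × List (List Int) × Int × Int :=
  ([[10, 20], [30, 40]], [[2]], 0, 1)

def Spec_kernel_multiplication (image : List (List Int)) (kernel : List (List Int)) (start_point_row : Int) (start_point_column : Int) (out : Int) : Prop := out = kernel_multiplication_alt image kernel start_point_row start_point_column
instance (image : List (List Int)) (kernel : List (List Int)) (start_point_row : Int) (start_point_column : Int) (out : Int) : Decidable (Spec_kernel_multiplication image kernel start_point_row start_point_column out) := by unfold Spec_kernel_multiplication; infer_instance

-- ===== CLAIM (what is proved, stated in full; the proofs are below) =====
def Claim_equal_kernel_multiplication : Prop := ∀ (image : List (List Int)) (kernel : List (List Int)) (start_point_row : Int) (start_point_column : Int), Dom_kernel_multiplication image kernel start_point_row start_point_column → Pre_kernel_multiplication image kernel start_point_row start_point_column → Spec_kernel_multiplication image kernel start_point_row start_point_column (kernel_multiplication image kernel start_point_row start_point_column)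

-- ===== LEMMAS AND PROOFS =====

-- B's inner loop: a fold accumulating (sum, count) over one row of the clipped rectangle.
lemma pairfold_inner (l : List Int) (f : Int → Int) (p : Int × Int) :
    l.foldl (fun p j => (p.1 + f j, p.2 + 1)) p = (p.1 + (l.map f).sum, p.2 + l.length) := by
  induction l generalizing p with
  | nil => simp
  | cons x xs ih => simp [ih]; constructor <;> omega

-- B's outer loop: each row contributes (F i, m) componentwise.
lemma pairfold_outer (l : List Int) (F : Int → Int) (m : Int) (p : Int × Int) :
    l.foldl (fun p i => (p.1 + F i, p.2 + m)) p = (p.1 + (l.map F).sum, p.2 + l.length * m) := by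
  induction l generalizing p with
  | nil => simp
  | cons x xs ih => simp [ih]; constructor <;> ring

-- Splitting a sum over range(a,b) at the clip boundaries [max a 0, min b c).
lemma row_split (f : Int → Int) (e : Int) (a b c : Int) (hc : 0 ≤ c) :
    ((PySem.List.pyRange a b 1).map (fun j => if 0 ≤ j ∧ j < c then f j else e)).sum
      = ((PySem.List.pyRange (max a 0) (min b c) 1).map f).sum
        + (((b - a).toNat : Int) - ((min b c - max a 0).toNat : Int)) * e := by
  by_cases hmid : max a 0 ≤ min b c
  · have h1 : a ≤ max a 0 := le_max_left a 0
    have h2 : min b c ≤ b := min_le_left b c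
    rw [PySem.List.pyRange_one_append a (max a 0) b h1 (le_trans hmid h2),
        PySem.List.pyRange_one_append (max a 0) (min b c) b hmid h2,
        List.map_append, List.map_append, List.sum_append, List.sum_append]
    have hpre : ∀ j ∈ PySem.List.pyRange a (max a 0) 1,
        (if 0 ≤ j ∧ j < c then f j else e) = e := by
      intro j hj
      rw [PySem.List.mem_pyRange_one] at hj
      have : ¬ (0 ≤ j ∧ j < c) := by omega
      simp [this]
    have hpost : ∀ j ∈ PySem.List.pyRange (min b c) b 1,
        (if 0 ≤ j ∧ j < c then f j else e) = e := by
      intro j hj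
      rw [PySem.List.mem_pyRange_one] at hj
      have : ¬ (0 ≤ j ∧ j < c) := by omega
      simp [this]
    have hmid' : ∀ j ∈ PySem.List.pyRange (max a 0) (min b c) 1,
        (if 0 ≤ j ∧ j < c then f j else e) = f j := by
      intro j hj
      rw [PySem.List.mem_pyRange_one] at hj
      have : 0 ≤ j ∧ j < c := by omega
      simp [this]
    rw [List.map_congr_left hpre, List.map_congr_left hpost, List.map_congr_left hmid',
        PySem.List.sum_map_const_int, PySem.List.sum_map_const_int, PySem.List.length_pyRange_one, PySem.List.length_pyRange_one]
    have hco : ((max a 0 - a).toNat : Int) + ((b - min b c).toNat : Int)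
        = ((b - a).toNat : Int) - ((min b c - max a 0).toNat : Int) := by omega
    linear_combination e * hco
  · have hempty : PySem.List.pyRange (max a 0) (min b c) 1 = [] :=
      PySem.List.pyRange_one_eq_nil (le_of_lt (not_le.mp hmid))
    have hall : ∀ j ∈ PySem.List.pyRange a b 1,
        (if 0 ≤ j ∧ j < c then f j else e) = e := by
      intro j hj
      rw [PySem.List.mem_pyRange_one] at hj
      have : ¬ (0 ≤ j ∧ j < c) := by omega
      simp [this]
    rw [List.map_congr_left hall, PySem.List.sum_map_const_int, PySem.List.length_pyRange_one, hempty]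
    have : ((min b c - max a 0).toNat : Int) = 0 := by omega
    simp [this]

-- A's double loop as one closed sum: clipped-rectangle sum plus (size^2 - clipped area) * e.
lemma A_sum (e : Int) (h : Int → Int → Int) (spr spc s rows cols : Int)
    (hs : 0 ≤ s) (hrows : 0 ≤ rows) (hcols : 0 ≤ cols) :
    ((PySem.List.pyRange spr (spr + s) 1).map (fun i =>
       ((PySem.List.pyRange spc (spc + s) 1).map (fun j =>
          if (0 ≤ i ∧ i < rows) ∧ (0 ≤ j ∧ j < cols) then h i j else e)).sum)).sum
    = ((PySem.List.pyRange (max spr 0) (min (spr + s) rows) 1).map (fun i =>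
         ((PySem.List.pyRange (max spc 0) (min (spc + s) cols) 1).map (h i)).sum)).sum
      + (s * s - ((min (spr + s) rows - max spr 0).toNat : Int) * ((min (spc + s) cols - max spc 0).toNat : Int)) * e := by
  have hinner : ∀ i, ((PySem.List.pyRange spc (spc + s) 1).map (fun j =>
          if (0 ≤ i ∧ i < rows) ∧ (0 ≤ j ∧ j < cols) then h i j else e)).sum
      = (if 0 ≤ i ∧ i < rows then
          ((PySem.List.pyRange (max spc 0) (min (spc + s) cols) 1).map (h i)).sum
            + (((spc + s - spc).toNat : Int) - ((min (spc + s) cols - max spc 0).toNat : Int)) * e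
         else ((spc + s - spc).toNat : Int) * e) := by
    intro i
    by_cases hi : 0 ≤ i ∧ i < rows
    · simp only [hi, if_true, true_and]
      exact row_split (h i) e spc (spc + s) cols hcols
    · simp only [eq_false hi, false_and, if_false]
      rw [PySem.List.sum_map_const_int, PySem.List.length_pyRange_one]
  calc ((PySem.List.pyRange spr (spr + s) 1).map (fun i =>
       ((PySem.List.pyRange spc (spc + s) 1).map (fun j =>
          if (0 ≤ i ∧ i < rows) ∧ (0 ≤ j ∧ j < cols) then h i j else e)).sum)).sum
      = ((PySem.List.pyRange spr (spr + s) 1).map (fun i =>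
          if 0 ≤ i ∧ i < rows then
            ((PySem.List.pyRange (max spc 0) (min (spc + s) cols) 1).map (h i)).sum
              + (((spc + s - spc).toNat : Int) - ((min (spc + s) cols - max spc 0).toNat : Int)) * e
          else ((spc + s - spc).toNat : Int) * e)).sum := by
        exact congrArg List.sum (List.map_congr_left (fun i _ => hinner i))
    _ = ((PySem.List.pyRange (max spr 0) (min (spr + s) rows) 1).map (fun i =>
            ((PySem.List.pyRange (max spc 0) (min (spc + s) cols) 1).map (h i)).sum
              + (((spc + s - spc).toNat : Int) - ((min (spc + s) cols - max spc 0).toNat : Int)) * e)).sum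
          + (((spr + s - spr).toNat : Int) - ((min (spr + s) rows - max spr 0).toNat : Int)) * (((spc + s - spc).toNat : Int) * e) := by
        exact row_split _ _ spr (spr + s) rows hrows
    _ = ((PySem.List.pyRange (max spr 0) (min (spr + s) rows) 1).map (fun i =>
         ((PySem.List.pyRange (max spc 0) (min (spc + s) cols) 1).map (h i)).sum)).sum
      + (s * s - ((min (spr + s) rows - max spr 0).toNat : Int) * ((min (spc + s) cols - max spc 0).toNat : Int)) * e := by
        rw [PySem.List.sum_map_add_int, PySem.List.sum_map_const_int, PySem.List.length_pyRange_one]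
        have e1 : ((spr + s - spr).toNat : Int) = s := by omega
        have e2 : ((spc + s - spc).toNat : Int) = s := by omega
        rw [e1, e2]
        ring

-- The common pixel value, before clamping: A's edge-tested double loop equals B's
-- clipped-rectangle (sum, count) fold followed by the single edge correction term.
lemma pixel_eq (a : Int → Int → Int) (K C s rows cols spr spc : Int)
    (hs : 0 ≤ s) (hrows : 0 ≤ rows) (hcols : 0 ≤ cols) :
    (PySem.List.pyRange spr (spr + s) 1).foldl (fun pixel i =>
      (PySem.List.pyRange spc (spc + s) 1).foldl (fun pixel j =>
        if (0 ≤ i ∧ i < rows) ∧ (0 ≤ j ∧ j < cols) then pixel + a i j * K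
        else pixel + C * K) pixel) 0
    = (if 0 < s * s - ((PySem.List.pyRange (max spr 0) (min (spr + s) rows) 1).foldl (fun p i =>
        (PySem.List.pyRange (max spc 0) (min (spc + s) cols) 1).foldl
          (fun p j => (p.1 + a i j, p.2 + 1)) p) ((0 : Int), (0 : Int))).2 then
         ((PySem.List.pyRange (max spr 0) (min (spr + s) rows) 1).foldl (fun p i =>
        (PySem.List.pyRange (max spc 0) (min (spc + s) cols) 1).foldl
          (fun p j => (p.1 + a i j, p.2 + 1)) p) ((0 : Int), (0 : Int))).1 * K + (s * s - ((PySem.List.pyRange (max spr 0) (min (spr + s) rows) 1).foldl (fun p i =>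
        (PySem.List.pyRange (max spc 0) (min (spc + s) cols) 1).foldl
          (fun p j => (p.1 + a i j, p.2 + 1)) p) ((0 : Int), (0 : Int))).2) * C * K
       else ((PySem.List.pyRange (max spr 0) (min (spr + s) rows) 1).foldl (fun p i =>
        (PySem.List.pyRange (max spc 0) (min (spc + s) cols) 1).foldl
          (fun p j => (p.1 + a i j, p.2 + 1)) p) ((0 : Int), (0 : Int))).1 * K) := by
  have hbody : ∀ (i j p : Int),
      (if (0 ≤ i ∧ i < rows) ∧ (0 ≤ j ∧ j < cols) then p + a i j * K else p + C * K)
        = p + (if (0 ≤ i ∧ i < rows) ∧ (0 ≤ j ∧ j < cols) then a i j * K else C * K) := by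
    intro i j p; split <;> rfl
  simp only [hbody, PySem.List.foldl_add, zero_add]
  have hA : ((PySem.List.pyRange spr (spr + s) 1).map (fun i =>
       ((PySem.List.pyRange spc (spc + s) 1).map (fun j =>
          if (0 ≤ i ∧ i < rows) ∧ (0 ≤ j ∧ j < cols) then a i j * K else C * K)).sum)).sum
      = ((PySem.List.pyRange (max spr 0) (min (spr + s) rows) 1).map (fun i =>
           ((PySem.List.pyRange (max spc 0) (min (spc + s) cols) 1).map (fun j => a i j * K)).sum)).sum
        + (s * s - ((min (spr + s) rows - max spr 0).toNat : Int) * ((min (spc + s) cols - max spc 0).toNat : Int)) * (C * K) :=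
    A_sum (C * K) (fun i j => a i j * K) spr spc s rows cols hs hrows hcols
  rw [hA]
  have hfac : ((PySem.List.pyRange (max spr 0) (min (spr + s) rows) 1).map (fun i =>
       ((PySem.List.pyRange (max spc 0) (min (spc + s) cols) 1).map (fun j => a i j * K)).sum)).sum
     = ((PySem.List.pyRange (max spr 0) (min (spr + s) rows) 1).map (fun i =>
       ((PySem.List.pyRange (max spc 0) (min (spc + s) cols) 1).map (a i)).sum)).sum * K := by
    calc ((PySem.List.pyRange (max spr 0) (min (spr + s) rows) 1).map (fun i =>
       ((PySem.List.pyRange (max spc 0) (min (spc + s) cols) 1).map (fun j => a i j * K)).sum)).sum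
        = ((PySem.List.pyRange (max spr 0) (min (spr + s) rows) 1).map (fun i =>
       ((PySem.List.pyRange (max spc 0) (min (spc + s) cols) 1).map (a i)).sum * K)).sum :=
          congrArg List.sum (List.map_congr_left fun i _ => List.sum_map_mul_right _ _ _)
      _ = _ := List.sum_map_mul_right _ _ _
  rw [hfac]
  have hVal : ((PySem.List.pyRange (max spr 0) (min (spr + s) rows) 1).foldl (fun p i =>
        (PySem.List.pyRange (max spc 0) (min (spc + s) cols) 1).foldl
          (fun p j => (p.1 + a i j, p.2 + 1)) p) ((0 : Int), (0 : Int)))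
      = (((PySem.List.pyRange (max spr 0) (min (spr + s) rows) 1).map (fun i =>
           ((PySem.List.pyRange (max spc 0) (min (spc + s) cols) 1).map (a i)).sum)).sum,
         ((PySem.List.pyRange (max spr 0) (min (spr + s) rows) 1).length : Int)
           * ((PySem.List.pyRange (max spc 0) (min (spc + s) cols) 1).length : Int)) := by
    simp only [pairfold_inner, pairfold_outer, zero_add]
  rw [hVal]
  simp only [PySem.List.length_pyRange_one]
  have hp1 : ((min (spr + s) rows - max spr 0).toNat : Int) ≤ s := by omega
  have hp0 : (0 : Int) ≤ ((min (spr + s) rows - max spr 0).toNat : Int) := by omega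
  have hq1 : ((min (spc + s) cols - max spc 0).toNat : Int) ≤ s := by omega
  have hq0 : (0 : Int) ≤ ((min (spc + s) cols - max spc 0).toNat : Int) := by omega
  have hpq : ((min (spr + s) rows - max spr 0).toNat : Int) * ((min (spc + s) cols - max spc 0).toNat : Int) ≤ s * s :=
    mul_le_mul hp1 hq1 hq0 hs
  by_cases hE : 0 < s * s - ((min (spr + s) rows - max spr 0).toNat : Int) * ((min (spc + s) cols - max spc 0).toNat : Int)
  · rw [if_pos hE]; ring
  · rw [if_neg hE]
    have h0 : s * s - ((min (spr + s) rows - max spr 0).toNat : Int) * ((min (spc + s) cols - max spc 0).toNat : Int) = 0 :=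
      le_antisymm (not_lt.mp hE) (by linarith)
    rw [h0]; ring

theorem kernel_multiplication_spec : Claim_equal_kernel_multiplication := by
  intro image kernel spr spc _ _
  unfold Spec_kernel_multiplication
  by_cases hk : kernel.length = 0
  · simp [kernel_multiplication, kernel_multiplication_alt, PySem.List.len, hk,
      PySem.List.pyRange_one_eq_nil le_rfl]
  · have hs : (0 : Int) ≤ (kernel.length : Int) := Int.natCast_nonneg _
    simp only [kernel_multiplication, kernel_multiplication_alt, PySem.List.len]
    rw [if_neg (show ¬((kernel.length : Int) = 0) from by exact_mod_cast hk)]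
    rw [show (if image = [] then (0 : Int) else ((PySem.List.pyGetD image 0 []).length : Int))
          = ((PySem.List.pyGetD image 0 []).length : Int) from by
        split
        next h => simp [h, PySem.List.pyGetD_zero]
        next => rfl]
    set K := PySem.List.pyGetD (PySem.List.pyGetD kernel 0 []) 0 0 with hK
    set C := PySem.List.pyGetD (PySem.List.pyGetD image (spr + PySem.Int.floordiv ((kernel.length : Int)) 2) [])
        (spc + PySem.Int.floordiv ((kernel.length : Int)) 2) 0 with hC
    set V := (PySem.List.pyRange (max spr 0) (min (spr + (kernel.length : Int)) ((image.length : Int))) 1).foldl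
        (fun p i => (PySem.List.pyRange (max spc 0)
            (min (spc + (kernel.length : Int)) (((PySem.List.pyGetD image 0 []).length : Int))) 1).foldl
          (fun p j => (p.1 + PySem.List.pyGetD (PySem.List.pyGetD image i []) j 0, p.2 + 1)) p)
        ((0 : Int), (0 : Int)) with hV
    set PA := (PySem.List.pyRange spr (spr + (kernel.length : Int)) 1).foldl (fun pixel i =>
        (PySem.List.pyRange spc (spc + (kernel.length : Int)) 1).foldl (fun pixel j =>
          if is_edge i j image then pixel + C * K
          else pixel + PySem.List.pyGetD (PySem.List.pyGetD image i []) j 0 * K) pixel) 0 with hPA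
    have hiff : ∀ (i j p : Int),
        (if is_edge i j image then p + C * K
         else p + PySem.List.pyGetD (PySem.List.pyGetD image i []) j 0 * K)
        = (if (0 ≤ i ∧ i < (image.length : Int)) ∧ (0 ≤ j ∧ j < ((PySem.List.pyGetD image 0 []).length : Int))
           then p + PySem.List.pyGetD (PySem.List.pyGetD image i []) j 0 * K else p + C * K) := by
      intro i j p
      by_cases hcond : (0 ≤ i ∧ i < (image.length : Int)) ∧ (0 ≤ j ∧ j < ((PySem.List.pyGetD image 0 []).length : Int))
      · have he : is_edge i j image = false := by
          simp only [is_edge, PySem.List.len, Bool.or_eq_false_iff, decide_eq_false_iff_not]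
          omega
        simp [he, hcond]
      · have he : is_edge i j image = true := by
          simp only [is_edge, PySem.List.len, Bool.or_eq_true, decide_eq_true_eq]
          omega
        simp [he, hcond]
    have hpix : PA = if 0 < (kernel.length : Int) * (kernel.length : Int) - V.2 then
        V.1 * K + ((kernel.length : Int) * (kernel.length : Int) - V.2) * C * K
      else V.1 * K := by
      rw [hPA, hV]
      simp only [hiff]
      exact pixel_eq (fun i j => PySem.List.pyGetD (PySem.List.pyGetD image i []) j 0) K C
        (kernel.length : Int) (image.length : Int) ((PySem.List.pyGetD image 0 []).length : Int)
        spr spc hs (Int.natCast_nonneg _) (Int.natCast_nonneg _)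
    rw [hpix]
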